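-- pv_equiv track=rewrite | github.com/mattdyer/pythonsudoku | solver_faster2.py | validateSet
-- ===== SOURCE A (Python) =====
-- number_check = {
-- 	int('000000000', 2):0,
-- 	int('100000000', 2):1,
-- 	int('010000000', 2):2,
-- 	int('001000000', 2):3,
-- 	int('000100000', 2):4,
-- 	int('000010000', 2):5,
-- 	int('000001000', 2):6,
-- 	int('000000100', 2):7,
-- 	int('000000010', 2):8,
-- 	int('000000001', 2):9
-- }
--
-- def validateSet(set):
--
-- 	validSet = True
-- 	check = {}
--
-- 	for num in range(1,10):
-- 		check[num] = 0
--
-- 	for number in set: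
--
-- 		if number in number_check and number != 0:
-- 			if check[number_check[number]] > 0:
-- 				validSet = False
--
-- 			check[number_check[number]] = check[number_check[number]] + 1
--
-- 	return validSet
-- ===== SOURCE B (Python) =====
-- number_check = {
--     int('000000000', 2): 0,
--     int('100000000', 2): 1,
--     int('010000000', 2): 2,
--     int('001000000', 2): 3,
--     int('000100000', 2): 4,
--     int('000010000', 2): 5,
--     int('000001000', 2): 6,
--     int('000000100', 2): 7,
--     int('000000010', 2): 8,
--     int('000000001', 2): 9
-- }
--
-- def validateSet(set):
--     vals = sorted(n for n in set if n in number_check and n != 0)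
--     return all(a != b for a, b in zip(vals, vals[1:]))
-- ===== Notes on version B (the rewrite author's own statement) =====
-- stated objective: alternative
-- what changed: Replaces the per-digit counter dictionary and running validity flag with a sort-then-scan: sort the recognised nonzero values and report whether no two adjacent sorted values are equal.
import Mathlib
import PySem

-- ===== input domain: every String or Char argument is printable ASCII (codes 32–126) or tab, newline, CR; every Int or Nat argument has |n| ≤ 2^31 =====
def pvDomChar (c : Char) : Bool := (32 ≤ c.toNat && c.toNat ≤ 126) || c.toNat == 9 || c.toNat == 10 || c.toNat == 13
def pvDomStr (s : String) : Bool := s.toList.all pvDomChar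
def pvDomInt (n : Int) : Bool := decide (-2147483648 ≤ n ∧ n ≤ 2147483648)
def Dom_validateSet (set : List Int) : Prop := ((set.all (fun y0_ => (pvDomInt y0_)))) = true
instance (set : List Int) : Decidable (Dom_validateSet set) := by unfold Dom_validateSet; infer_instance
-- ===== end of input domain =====

-- B replaces A's per-digit counter dict and running validity flag by a sort-then-scan:
-- sort the recognised nonzero values, then check no two adjacent sorted values are equal (alternative).

-- ===== PORT A =====
-- module-level constant number_check (binary-literal keys evaluated: 256, 128, ..., 1)
def numberCheck : PySem.Dict Int Int :=
  PySem.Dict.ofList [(0, 0), (256, 1), (128, 2), (64, 3), (32, 4), (16, 5), (8, 6), (4, 7), (2, 8), (1, 9)]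

def validateSet (set : List Int) : Bool :=
  let validSet := true
  -- for num in range(1,10): check[num] = 0
  let check : PySem.Dict Int Int :=
    (PySem.List.pyRange 1 10 1).foldl (fun c num => c.insert num 0) PySem.Dict.empty
  -- for number in set: ...
  let st := set.foldl
    (fun (st : Bool × PySem.Dict Int Int) number =>
      if numberCheck.contains number && number != 0 then
        -- number_check[number]: the key is present (guarded by the membership test), so getD is exact;
        -- check[...]: the digit is in 1..9 here (number ≠ 0), so that key is present too and getD is exact
        (if st.2.getD (numberCheck.getD number 0) 0 > 0 then false else st.1,
         st.2.insert (numberCheck.getD number 0) (st.2.getD (numberCheck.getD number 0) 0 + 1))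
      else st)
    (validSet, check)
  st.1

-- ===== PORT B =====
def validateSet_alt (set : List Int) : Bool :=
  -- vals = sorted(n for n in set if n in number_check and n != 0)
  let vals := PySem.List.sorted (set.filter (fun n => numberCheck.contains n && n != 0)) (fun x => x) false
  -- all(a != b for a, b in zip(vals, vals[1:]))   (vals[1:] = tail)
  (vals.zip vals.tail).all (fun p => p.1 != p.2)

-- ===== PRECONDITION & SPEC =====
def Spec_validateSet (set : List Int) (out : Bool) : Prop := out = validateSet_alt set
instance (set : List Int) (out : Bool) : Decidable (Spec_validateSet set out) := by unfold Spec_validateSet; infer_instance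

-- ===== CLAIM (what is proved, stated in full; the proofs are below) =====
def Claim_equal_validateSet : Prop := ∀ (set : List Int), Dom_validateSet set → Spec_validateSet set (validateSet set)

-- ===== LEMMAS AND PROOFS =====

-- the digit a recognised value maps to
def pvDigit (n : Int) : Int := numberCheck.getD n 0

-- A's loop characterised: from flag b and a counter dict holding the digit-counts of dp, the final
-- flag is b && "the digits of the recognised nonzero values of l are nodup and avoid dp"
theorem pvLoopA (l : List Int) : ∀ (b : Bool) (c : PySem.Dict Int Int) (dp : List Int),
    (∀ d, c.getD d 0 = dp.count d) →
    (l.foldl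
      (fun (st : Bool × PySem.Dict Int Int) number =>
        if numberCheck.contains number && number != 0 then
          (if st.2.getD (numberCheck.getD number 0) 0 > 0 then false else st.1,
           st.2.insert (numberCheck.getD number 0) (st.2.getD (numberCheck.getD number 0) 0 + 1))
        else st)
      (b, c)).1
    = (b && decide (((l.filter (fun n => numberCheck.contains n && n != 0)).map pvDigit).Nodup ∧
        ∀ x ∈ (l.filter (fun n => numberCheck.contains n && n != 0)).map pvDigit, x ∉ dp)) := by
  induction l with
  | nil => intro b c dp h; simp
  | cons x l ih =>
    intro b c dp h
    by_cases hp : (numberCheck.contains x && x != 0) = true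
    · have hnew : ∀ d, (c.insert (numberCheck.getD x 0) (c.getD (numberCheck.getD x 0) 0 + 1)).getD d 0
          = ((pvDigit x :: dp).count d : Int) := by
        intro d
        rw [PySem.Dict.getD_insert]
        by_cases h1 : d = numberCheck.getD x 0
        · subst h1; simp [pvDigit, h]
        · have h2 : ¬ numberCheck.getD x 0 = d := fun hh => h1 hh.symm
          simp [pvDigit, h, h1, h2]
      rw [List.foldl_cons, if_pos hp]
      simp only []
      rw [ih _ _ (pvDigit x :: dp) hnew]
      rw [List.filter_cons, if_pos hp, List.map_cons, h]
      by_cases hd : numberCheck.getD x 0 ∈ dp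
      · rw [if_pos (by exact_mod_cast Int.natCast_pos.mpr (List.count_pos_iff.mpr hd))]
        rw [Bool.false_and]
        symm
        rw [Bool.and_eq_false_iff]
        right
        rw [decide_eq_false_iff_not]
        rintro ⟨-, hall⟩
        exact hall _ (List.mem_cons_self) hd
      · rw [if_neg (by simp [List.count_eq_zero.mpr hd])]
        congr 1
        rw [decide_eq_decide]
        simp only [List.nodup_cons, List.mem_cons, not_or, pvDigit]
        constructor
        · rintro ⟨hn, hall⟩
          refine ⟨⟨fun hm => (hall _ hm).1 rfl, hn⟩, ?_⟩
          intro y hy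
          rcases hy with rfl | hy
          · exact hd
          · exact (hall y hy).2
        · rintro ⟨⟨hnm, hn⟩, hall⟩
          exact ⟨hn, fun y hy => ⟨fun hh => hnm (hh ▸ hy), hall y (Or.inr hy)⟩⟩
    · rw [List.foldl_cons, if_neg (by simpa using hp), List.filter_cons, if_neg hp]
      exact ih b c dp h

-- the initial counter dict (1..9 all set to 0) counts the empty prefix
theorem pvInitCheck (d : Int) :
    ((PySem.List.pyRange 1 10 1).foldl (fun c num => c.insert num 0) PySem.Dict.empty).getD d 0
      = (([] : List Int).count d : Int) := by
  rw [show PySem.List.pyRange 1 10 1 = [1,2,3,4,5,6,7,8,9] from by decide]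
  simp only [List.foldl_cons, List.foldl_nil, PySem.Dict.getD_insert]
  split_ifs <;> simp [PySem.Dict.getD_empty]

-- the ten keys of number_check
theorem pvKeys : numberCheck.keys = [0, 256, 128, 64, 32, 16, 8, 4, 2, 1] := by decide

-- pvDigit is injective on the keys of number_check
theorem pvDigitInj : ∀ x ∈ ([0, 256, 128, 64, 32, 16, 8, 4, 2, 1] : List Int),
    ∀ y ∈ ([0, 256, 128, 64, 32, 16, 8, 4, 2, 1] : List Int), pvDigit x = pvDigit y → x = y := by
  decide

-- the adjacent-pairs scan computes IsChain (· ≠ ·)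
theorem pvZipAdj : ∀ (l : List Int),
    ((l.zip l.tail).all (fun p => p.1 != p.2) = true) ↔ l.IsChain (· ≠ ·) := by
  intro l
  induction l with
  | nil => simp only [List.zip_nil_left, List.all_nil, true_iff]; exact List.isChain_nil
  | cons x l ih =>
    cases l with
    | nil => simp only [List.tail_cons, List.zip_nil_right, List.all_nil, true_iff]; exact List.isChain_singleton x
    | cons y t =>
      simp only [List.tail_cons, List.zip_cons_cons, List.all_cons, Bool.and_eq_true,
        bne_iff_ne, List.isChain_cons_cons]
      exact and_congr Iff.rfl ih

-- two chains combine to a strict chain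
theorem pvChainLt : ∀ (l : List Int), l.IsChain (· ≤ ·) → l.IsChain (· ≠ ·) → l.IsChain (· < ·) := by
  intro l
  induction l with
  | nil => intro _ _; exact List.isChain_nil
  | cons x l ih =>
    cases l with
    | nil => intro _ _; exact List.isChain_singleton x
    | cons y t =>
      simp only [List.isChain_cons_cons]
      rintro ⟨h1, h2⟩ ⟨h3, h4⟩
      exact ⟨lt_of_le_of_ne h1 h3, ih h2 h4⟩

-- on a ≤-sorted list, "no two adjacent equal" ↔ nodup
theorem pvSortedNodup (l : List Int) (hp : l.Pairwise (· ≤ ·)) :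
    l.IsChain (· ≠ ·) ↔ l.Nodup := by
  constructor
  · intro hc
    have hlt : l.IsChain (· < ·) := pvChainLt l hp.isChain hc
    exact (List.isChain_iff_pairwise.mp hlt).imp (fun h => ne_of_lt h)
  · intro hn
    have : l.Pairwise (· < ·) := (hp.and hn).imp (fun ⟨h1, h2⟩ => lt_of_le_of_ne h1 h2)
    exact this.isChain.imp (fun _ _ h => ne_of_lt h)

-- ===== VERDICT (by name: the statement is the Claim_ definition above) =====
theorem validateSet_spec : Claim_equal_validateSet := by
  intro set _
  unfold Spec_validateSet validateSet validateSet_alt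
  simp only []
  rw [pvLoopA set true _ [] (fun d => pvInitCheck d)]
  set values := set.filter (fun n => numberCheck.contains n && n != 0) with hv
  have hmem : ∀ x ∈ values, x ∈ ([0, 256, 128, 64, 32, 16, 8, 4, 2, 1] : List Int) := by
    intro x hx
    have hc : numberCheck.contains x = true :=
      ((Bool.and_eq_true _ _).mp (List.mem_filter.mp hx).2).1
    rw [PySem.Dict.contains_iff_mem_keys, pvKeys] at hc
    exact hc
  have hiff : (values.map pvDigit).Nodup ↔ values.Nodup := by
    constructor
    · exact List.Nodup.of_map pvDigit
    · intro h
      exact h.map_on (fun x hx y hy => pvDigitInj x (hmem x hx) y (hmem y hy))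
  set vals := PySem.List.sorted values (fun x => x) false with hvals
  have hperm : vals.Perm values := PySem.List.sorted_perm values (fun x => x) false
  have hsorted : vals.Pairwise (· ≤ ·) := by
    have := PySem.List.sorted_pairwise values (fun x => x)
    simpa using this
  have hB : ((vals.zip vals.tail).all (fun p => p.1 != p.2) = true) ↔ values.Nodup := by
    rw [pvZipAdj, pvSortedNodup vals hsorted]
    exact hperm.nodup_iff
  simp only [Bool.true_and, List.not_mem_nil, not_false_iff, implies_true, and_true]
  by_cases hnd : values.Nodup
  · rw [decide_eq_true (hiff.mpr hnd)]
    exact (hB.mpr hnd).symm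
  · rw [decide_eq_false (fun hh => hnd (hiff.mp hh))]
    symm
    rw [Bool.eq_false_iff]
    exact fun hh => hnd (hB.mp hh)
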